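-- pv_equiv track=rewrite | github.com/HaoZeke/pyperf | pyperf/_cpu_utils.py | format_cpu_infos
-- ===== SOURCE A (Python) =====
-- import collections
--
-- def format_cpu_list(cpus):
--     cpus = sorted(cpus)
--     parts = []
--     first = None
--     last = None
--     for cpu in cpus:
--         if first is None:
--             first = cpu
--         elif cpu != last + 1:
--             if first != last:
--                 parts.append(f'{first}-{last}')
--             else:
--                 parts.append(str(last))
--             first = cpu
--         last = cpu
--     if first != last:
--         parts.append(f'{first}-{last}')
--     else:
--         parts.append(str(last))
--     return ','.join(parts)
--
-- def format_cpu_infos(infos):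
--     groups = collections.defaultdict(list)
--     for cpu, info in infos.items():
--         groups[info].append(cpu)
--
--     items = [(cpus, info) for info, cpus in groups.items()]
--     items.sort()
--     text = []
--     for cpus, info in items:
--         cpus = format_cpu_list(cpus)
--         text.append(f'{cpus}={info}')
--     return text
-- ===== SOURCE B (Python) =====
-- def _ranges(cs):
--     # peel one maximal consecutive run of the (sorted) list at a time
--     out = []
--     i = 0
--     n = len(cs)
--     while i < n:
--         first = cs[i]
--         last = first
--         i += 1
--         while i < n and cs[i] == last + 1:
--             last = cs[i]
--             i += 1
--         out.append((first, last))
--     return out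
--
-- def format_cpu_list(cpus):
--     return ','.join(str(a) if a == b else f'{a}-{b}'
--                     for a, b in _ranges(sorted(cpus)))
--
-- def format_cpu_infos(infos):
--     groups = {}
--     for cpu, info in infos.items():
--         groups.setdefault(info, []).append(cpu)
--     items = sorted((cpus, info) for info, cpus in groups.items())
--     return [f'{format_cpu_list(cpus)}={info}' for cpus, info in items]
-- ===== Notes on version B (the rewrite author's own statement) =====
-- stated objective: alternative
-- what changed: format_cpu_list's first/last break-detecting state machine is replaced by a pass that peels one maximal consecutive run at a time into (first, last) pairs and formats those pairs with a generator expression; the outer function keeps the grouping but builds the result as a comprehension over sorted(...) instead of an in-place items.sort() plus append loop.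
import Mathlib
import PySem

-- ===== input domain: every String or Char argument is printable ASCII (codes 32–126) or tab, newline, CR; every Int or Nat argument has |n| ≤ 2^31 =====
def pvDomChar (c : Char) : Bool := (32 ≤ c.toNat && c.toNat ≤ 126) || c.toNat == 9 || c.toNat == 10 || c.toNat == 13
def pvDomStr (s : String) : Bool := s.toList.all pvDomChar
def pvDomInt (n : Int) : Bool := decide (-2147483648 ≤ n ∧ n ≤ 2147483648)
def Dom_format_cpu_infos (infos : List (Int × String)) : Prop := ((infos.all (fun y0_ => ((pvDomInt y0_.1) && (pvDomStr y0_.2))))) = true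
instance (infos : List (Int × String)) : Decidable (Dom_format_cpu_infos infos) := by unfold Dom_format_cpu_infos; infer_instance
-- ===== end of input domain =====

-- B replaces A's first/last state-machine over the sorted cpus by a recursion that peels one
-- maximal consecutive run at a time (objective: alternative decomposition, same cost).
-- The dict[int,str] parameter is interpreted as the Python dict the assoc list denotes
-- (PySem.Dict.ofList: unique keys, first position, last value) in BOTH ports.

-- ===== PORT A =====
-- str(x) for x an int or None (f'{first}-{last}' renders None as "None")
def pvStrOptA : Option Int → String
  | some n => PySem.Int.toStr n
  | none => "None"

-- the duplicated append block: if first != last: parts.append(f'{first}-{last}') else: parts.append(str(last))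
def pvAppendRangeA (parts : List String) (first last : Option Int) : List String :=
  if first ≠ last then parts ++ [pvStrOptA first ++ "-" ++ pvStrOptA last]
  else parts ++ [pvStrOptA last]

-- one iteration of A's loop; state = (parts, first, last)
def pvStepA (st : List String × Option Int × Option Int) (cpu : Int) : List String × Option Int × Option Int :=
  match st with
  | (parts, none, _) => (parts, some cpu, some cpu)
  | (parts, some f, last) =>
      if some cpu ≠ last.map (· + 1) then (pvAppendRangeA parts (some f) last, some cpu, some cpu)
      else (parts, some f, some cpu)

def format_cpu_list_A (cpus : List Int) : String :=
  let cs := PySem.List.sorted cpus (fun x => x) false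
  let st := cs.foldl pvStepA ([], none, none)
  PySem.Str.join "," (pvAppendRangeA st.1 st.2.1 st.2.2)

def format_cpu_infos (infos : List (Int × String)) : List String :=
  let d := PySem.Dict.ofList infos
  let groups := d.items.foldl
    (fun (g : PySem.Dict String (List Int)) p => g.modify p.2 [] (fun cs => cs ++ [p.1]))
    PySem.Dict.empty
  let items := PySem.List.sorted2 (groups.items.map (fun q => (q.2, q.1)))
    (fun q => q.1) (fun q => q.2) false
  items.foldl (fun text q => text ++ [format_cpu_list_A q.1 ++ "=" ++ q.2]) []

-- ===== PORT B =====
-- the inner while of _ranges: extend `last` while the next element is last + 1; returns (last, rest)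
def pvTakeRunB (last : Int) : List Int → Int × List Int
  | [] => (last, [])
  | c :: rest => if c = last + 1 then pvTakeRunB c rest else (last, c :: rest)

theorem pvTakeRunB_len (a : Int) (xs : List Int) : (pvTakeRunB a xs).2.length ≤ xs.length := by
  induction xs generalizing a with
  | nil => simp [pvTakeRunB]
  | cons c rest ih =>
    simp only [pvTakeRunB]
    split
    · exact le_trans (ih c) (Nat.le_succ _)
    · simp

-- _ranges: outer loop of the peeling pass, one maximal consecutive run per step
def pvRangesB : List Int → List (Int × Int)
  | [] => []
  | c :: rest => (c, (pvTakeRunB c rest).1) :: pvRangesB (pvTakeRunB c rest).2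
termination_by cs => cs.length
decreasing_by simpa using Nat.lt_succ_of_le (pvTakeRunB_len c rest)

-- str(a) if a == b else f'{a}-{b}'
def pvFmtB (r : Int × Int) : String :=
  if r.1 = r.2 then PySem.Int.toStr r.1 else PySem.Int.toStr r.1 ++ "-" ++ PySem.Int.toStr r.2

def format_cpu_list_B (cpus : List Int) : String :=
  PySem.Str.join "," ((pvRangesB (PySem.List.sorted cpus (fun x => x) false)).map pvFmtB)

def format_cpu_infos_alt (infos : List (Int × String)) : List String :=
  let d := PySem.Dict.ofList infos
  let groups := d.items.foldl
    (fun (g : PySem.Dict String (List Int)) p => g.modify p.2 [] (fun cs => cs ++ [p.1]))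
    PySem.Dict.empty
  let items := PySem.List.sorted2 (groups.items.map (fun q => (q.2, q.1)))
    (fun q => q.1) (fun q => q.2) false
  items.map (fun q => format_cpu_list_B q.1 ++ "=" ++ q.2)

-- ===== PRECONDITION & SPEC =====
def Spec_format_cpu_infos (infos : List (Int × String)) (out : List String) : Prop := out = format_cpu_infos_alt infos
instance (infos : List (Int × String)) (out : List String) : Decidable (Spec_format_cpu_infos infos out) := by unfold Spec_format_cpu_infos; infer_instance

-- ===== CLAIM (what is proved, stated in full; the proofs are below) =====
def Claim_equal_format_cpu_infos : Prop := ∀ (infos : List (Int × String)), Dom_format_cpu_infos infos → Spec_format_cpu_infos infos (format_cpu_infos infos)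

-- ===== LEMMAS AND PROOFS =====

-- A's loop, started mid-run (open run began at f, currently at l), finishes by flushing the
-- runs that B's peeling recursion computes.
theorem pv_foldA (cs : List Int) : ∀ (parts : List String) (f l : Int),
    (let st := cs.foldl pvStepA (parts, some f, some l)
     pvAppendRangeA st.1 st.2.1 st.2.2)
    = parts ++ ((f, (pvTakeRunB l cs).1) :: pvRangesB (pvTakeRunB l cs).2).map pvFmtB := by
  induction cs with
  | nil =>
    intro parts f l
    simp only [List.foldl_nil, pvTakeRunB, pvRangesB, List.map, pvAppendRangeA, pvFmtB, pvStrOptA]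
    by_cases h : f = l <;> simp [h]
  | cons c rest ih =>
    intro parts f l
    simp only [List.foldl_cons, pvStepA, pvTakeRunB]
    by_cases h : c = l + 1
    · subst h
      have hc : ¬ (some (l + 1) ≠ Option.map (· + 1) (some l)) := by simp
      rw [if_pos rfl, if_neg hc]
      exact ih parts f (l + 1)
    · have hne : some c ≠ (some l).map (· + 1) := by simp [h]
      simp only [Option.map_some] at hne ⊢
      rw [if_pos hne, ih]
      have hflush : pvAppendRangeA parts (some f) (some l) = parts ++ [pvFmtB (f, l)] := by
        simp only [pvAppendRangeA, pvStrOptA, pvFmtB]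
        by_cases hfl : f = l <;> simp [hfl]
      rw [hflush, if_neg h]
      rw [pvRangesB]
      simp

-- on a nonempty cpu list the two formatters agree
theorem pv_fmt_eq (cpus : List Int) (h : cpus ≠ []) :
    format_cpu_list_A cpus = format_cpu_list_B cpus := by
  simp only [format_cpu_list_A, format_cpu_list_B]
  have hs : PySem.List.sorted cpus (fun x => x) false ≠ [] := by
    simpa [PySem.List.sorted_eq_nil_iff] using h
  obtain ⟨c, t, hct⟩ := List.exists_cons_of_ne_nil hs
  rw [hct]
  have h1 : (c :: t).foldl pvStepA ([], none, none) = t.foldl pvStepA ([], some c, some c) := by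
    simp [pvStepA]
  rw [h1, pv_foldA t [] c c, pvRangesB]
  simp

-- the value appended into the groups dict for key c is the list of cpus whose info is c
theorem pv_getD_groups (l : List (Int × String)) (g : PySem.Dict String (List Int)) (c : String) :
    (l.foldl (fun (g : PySem.Dict String (List Int)) p => g.modify p.2 [] (fun cs => cs ++ [p.1])) g).getD c []
      = g.getD c [] ++ (l.filter (fun p => p.2 == c)).map (fun p => p.1) := by
  induction l generalizing g with
  | nil => simp
  | cons p t ih =>
    simp only [List.foldl_cons, ih, List.filter_cons]
    rw [PySem.Dict.getD_modify]
    by_cases h : c = p.2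
    · simp [h, List.append_assoc]
    · have : (p.2 == c) = false := by simpa using fun hh => h hh.symm
      simp [h, this]

-- every value stored in the groups dict is a nonempty cpu list
theorem pv_groups_val_ne_nil (l : List (Int × String)) (pr : String × List Int)
    (hpr : pr ∈ (l.foldl (fun (g : PySem.Dict String (List Int)) p => g.modify p.2 [] (fun cs => cs ++ [p.1])) PySem.Dict.empty).items) :
    pr.2 ≠ [] := by
  have hnd : (l.foldl (fun (g : PySem.Dict String (List Int)) p => g.modify p.2 [] (fun cs => cs ++ [p.1])) PySem.Dict.empty).keys.Nodup := by
    exact PySem.Dict.nodup_keys_foldl_modify_key l (fun p => p.2) []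
      (fun _ p cs => cs ++ [p.1]) PySem.Dict.empty (by simp [PySem.Dict.empty])
  rw [PySem.Dict.items_eq_map_keys _ hnd []] at hpr
  obtain ⟨k, hk, hpr⟩ := List.mem_map.mp hpr
  rw [PySem.Dict.keys_foldl_modify_key] at hk
  have hk' : k ∈ l.map (fun p => p.2) := by
    have := (PySem.Set.mem_update _ _ _).mp hk
    simpa [PySem.Dict.empty, PySem.Dict.keys] using this
  obtain ⟨p, hp, hpk⟩ := List.mem_map.mp hk'
  have hval : (l.foldl (fun (g : PySem.Dict String (List Int)) p => g.modify p.2 [] (fun cs => cs ++ [p.1])) PySem.Dict.empty).getD k []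
      = (l.filter (fun p => p.2 == k)).map (fun p => p.1) := by
    rw [pv_getD_groups]
    rfl
  have hfil : p ∈ l.filter (fun p => p.2 == k) := by
    simp only [List.mem_filter]
    exact ⟨hp, by simp [hpk]⟩
  subst hpr
  simp only [hval]
  intro hcon
  rw [List.map_eq_nil_iff] at hcon
  rw [hcon] at hfil
  simp at hfil

-- ===== VERDICT (by name: the statement is the Claim_ definition above) =====
theorem format_cpu_infos_spec : Claim_equal_format_cpu_infos := by
  intro infos _
  show format_cpu_infos infos = format_cpu_infos_alt infos
  simp only [format_cpu_infos, format_cpu_infos_alt]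
  rw [PySem.List.foldl_append_singleton_eq_map
    (f := fun q : List Int × String => format_cpu_list_A q.1 ++ "=" ++ q.2)]
  rw [List.nil_append]
  apply List.map_congr_left
  intro q hq
  have hq' : q ∈ ((PySem.Dict.ofList infos).items.foldl
      (fun (g : PySem.Dict String (List Int)) p => g.modify p.2 [] (fun cs => cs ++ [p.1]))
      PySem.Dict.empty).items.map (fun q => (q.2, q.1)) :=
    (PySem.List.sorted2_perm _ _ _ _).mem_iff.mp hq
  obtain ⟨pr, hpr, hqpr⟩ := List.mem_map.mp hq'
  have hne : q.1 ≠ [] := by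
    rw [← hqpr]
    exact pv_groups_val_ne_nil _ pr hpr
  rw [pv_fmt_eq q.1 hne]
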